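-- pv_equiv track=rewrite | github.com/viatoro/atopile | src/faebryk/libs/eda/altium/models/server/api.py | _pick_workspace
-- ===== SOURCE A (Python) =====
-- def _pick_workspace(
--     workspaces: list[dict[str, str | None]],
--     name: str | None = None,
-- ) -> dict[str, str | None]:
--     """Pick a single workspace from a `GetUserWorkspaces` result.
--
--     If `name` is given, require an exact match on `name`. Otherwise
--     prefer the user's default workspace (`isdefault=true`), then the
--     first Active one, then the first record. Raises `RuntimeError` if
--     the list is empty or `name` doesn't match anything.
--     """
--     if not workspaces:
--         raise RuntimeError("GetUserWorkspaces returned no workspaces for this user")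
--
--     if name is not None:
--         match = next((w for w in workspaces if w.get("name") == name), None)
--         if match is None:
--             available = sorted(w.get("name") or "?" for w in workspaces)
--             raise RuntimeError(f"no workspace named {name!r}; available: {available}")
--         return match
--
--     default = next(
--         (w for w in workspaces if (w.get("isdefault") or "").lower() == "true"),
--         None,
--     )
--     if default is not None:
--         return default
--
--     active = next(
--         (w for w in workspaces if (w.get("statusname") or "") == "Active"),
--         None,
--     )
--     return active or workspaces[0]
-- ===== SOURCE B (Python) =====
-- def _preference_rank(w):
--     """Preference order for the default case: default < Active < anything."""
--     if (w.get("isdefault") or "").lower() == "true":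
--         return 0
--     if (w.get("statusname") or "") == "Active":
--         return 1
--     return 2
--
--
-- def _pick_workspace(
--     workspaces,
--     name=None,
-- ):
--     """Pick a single workspace: exact name match if `name` is given, else the
--     workspace with the best preference rank (min is stable, so ties keep the
--     first record; with all ranks equal this is workspaces[0])."""
--     if not workspaces:
--         raise RuntimeError("GetUserWorkspaces returned no workspaces for this user")
--
--     if name is not None:
--         match = next((w for w in workspaces if w.get("name") == name), None)
--         if match is None:
--             available = sorted(w.get("name") or "?" for w in workspaces)
--             raise RuntimeError(f"no workspace named {name!r}; available: {available}")
--         return match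
--
--     return min(workspaces, key=_preference_rank)
-- ===== Notes on version B (the rewrite author's own statement) =====
-- stated objective: alternative
-- what changed: The default-preference case is recast as selection by a total ranking function (default=0, Active=1, other=2) computed per record and resolved with one stable min(key=rank), instead of A's three staged early-terminating next() scans; correctness: min returns the first record of minimal rank, which coincides with first-default, else first-Active, else first record.
import Mathlib
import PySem

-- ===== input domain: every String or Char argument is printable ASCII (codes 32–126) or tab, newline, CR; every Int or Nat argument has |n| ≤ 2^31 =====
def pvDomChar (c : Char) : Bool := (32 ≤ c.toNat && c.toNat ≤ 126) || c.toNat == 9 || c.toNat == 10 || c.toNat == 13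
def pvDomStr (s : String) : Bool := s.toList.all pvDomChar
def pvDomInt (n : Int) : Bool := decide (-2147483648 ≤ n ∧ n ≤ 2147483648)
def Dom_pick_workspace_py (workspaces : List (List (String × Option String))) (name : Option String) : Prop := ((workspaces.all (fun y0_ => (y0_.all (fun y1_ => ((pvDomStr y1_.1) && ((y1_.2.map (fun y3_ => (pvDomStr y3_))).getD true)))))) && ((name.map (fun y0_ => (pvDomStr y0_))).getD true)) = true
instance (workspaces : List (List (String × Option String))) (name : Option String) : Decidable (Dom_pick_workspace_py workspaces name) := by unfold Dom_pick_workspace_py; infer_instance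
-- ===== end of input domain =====

-- B replaces A's staged next() scans of the default-preference case by a total
-- ranking function (default=0, Active=1, other=2) and one stable min(key=rank);
-- equal return value everywhere A returns (alternative decomposition, same cost).

-- `w.get(k)` on a dict[str, str|None]: first match; a stored None and a missing key both give none (exact).
def pvDGet (w : List (String × Option String)) (k : String) : Option String :=
  match w with
  | [] => none
  | (k', v) :: t => if k' == k then v else pvDGet t k

-- `w.get("name") == name` for a str name (exact: None never equals a str)
def pvIsName (n : String) (w : List (String × Option String)) : Bool :=
  pvDGet w "name" == some n

-- `(w.get("isdefault") or "").lower() == "true"`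
def pvIsDef (w : List (String × Option String)) : Bool :=
  PySem.Str.lower ((pvDGet w "isdefault").getD "") == "true"

-- `(w.get("statusname") or "") == "Active"`
def pvIsAct (w : List (String × Option String)) : Bool :=
  (pvDGet w "statusname").getD "" == "Active"

-- ===== PORT A =====
def pick_workspace_py (workspaces : List (List (String × Option String))) (name : Option String) : List (String × Option String) :=
  if workspaces = [] then []  -- Python raises RuntimeError; excluded by Pre_
  else
    match name with
    | some n =>
      -- next((w for w in workspaces if w.get("name") == name), None)
      match workspaces.find? (pvIsName n) with
      | some m => m
      | none => []  -- Python raises RuntimeError; excluded by Pre_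
    | none =>
      match workspaces.find? pvIsDef with  -- first next() scan
      | some d => d
      | none =>
        match workspaces.find? pvIsAct with  -- second next() scan
        | some a => if a = [] then workspaces.headD [] else a  -- `active or workspaces[0]`
        | none => workspaces.headD []

-- ===== PORT B =====
-- `_preference_rank(w)`
def pvRank (w : List (String × Option String)) : Nat :=
  if pvIsDef w then 0
  else if pvIsAct w then 1
  else 2

def pick_workspace_py_alt (workspaces : List (List (String × Option String))) (name : Option String) : List (String × Option String) :=
  if workspaces = [] then []  -- raise, excluded by Pre_
  else
    match name with
    | some n =>
      match workspaces.find? (pvIsName n) with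
      | some m => m
      | none => []  -- raise, excluded by Pre_
    | none =>
      -- min(workspaces, key=_preference_rank); list nonempty so getD is never hit
      (PySem.List.min? workspaces pvRank).getD []

-- ===== PRECONDITION & SPEC =====
-- Pre_ excludes exactly the inputs where the Python raises RuntimeError: the empty
-- workspace list, and a given name matched by no workspace.
def Pre_pick_workspace_py (workspaces : List (List (String × Option String))) (name : Option String) : Prop :=
  workspaces ≠ [] ∧
    name.all (fun n => workspaces.any (fun w => ((w.find? (fun p => p.1 == "name")).bind (·.2)) == some n)) = true
instance (workspaces : List (List (String × Option String))) (name : Option String) : Decidable (Pre_pick_workspace_py workspaces name) := by unfold Pre_pick_workspace_py; infer_instance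

def pvWitness_pick_workspace_py : (List (List (String × Option String))) × Option String :=
  ([[("name", some "ws1"), ("isdefault", some "true")]], some "ws1")

def Spec_pick_workspace_py (workspaces : List (List (String × Option String))) (name : Option String) (out : List (String × Option String)) : Prop := out = pick_workspace_py_alt workspaces name
instance (workspaces : List (List (String × Option String))) (name : Option String) (out : List (String × Option String)) : Decidable (Spec_pick_workspace_py workspaces name out) := by unfold Spec_pick_workspace_py; infer_instance

-- ===== CLAIM =====
def Claim_equal_pick_workspace_py : Prop := ∀ (workspaces : List (List (String × Option String))) (name : Option String), Dom_pick_workspace_py workspaces name → Pre_pick_workspace_py workspaces name → Spec_pick_workspace_py workspaces name (pick_workspace_py workspaces name)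

-- ===== LEMMAS AND PROOFS =====

-- one step of min?'s fold
def pvMinStep (acc : Option (List (String × Option String))) (x : List (String × Option String)) :
    Option (List (String × Option String)) :=
  match acc with
  | none => some x
  | some m => if pvRank x < pvRank m then some x else some m

lemma min?_eq_foldl (ws : List (List (String × Option String))) :
    PySem.List.min? ws pvRank = ws.foldl pvMinStep none := by
  unfold PySem.List.min?
  congr 1
  funext acc x
  cases acc <;> rfl

lemma rank0_iff (w : List (String × Option String)) : (pvRank w = 0) ↔ pvIsDef w = true := by
  unfold pvRank; split_ifs <;> simp_all

lemma rank1_iff (w : List (String × Option String)) :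
    (pvRank w = 1) ↔ (pvIsDef w = false ∧ pvIsAct w = true) := by
  unfold pvRank; split_ifs <;> simp_all

-- the fold with current minimum m: first rank-0 of the tail wins, else first rank-1
-- (if it beats m), else m
lemma foldl_step_some (t : List (List (String × Option String))) (m : List (String × Option String)) :
    t.foldl pvMinStep (some m) =
      if pvRank m = 0 then some m
      else
        match t.find? (fun w => pvRank w == 0) with
        | some d => some d
        | none =>
          if pvRank m = 1 then some m
          else
            match t.find? (fun w => pvRank w == 1) with
            | some a => some a
            | none => some m := by
  induction t generalizing m with
  | nil => simp
  | cons w t ih =>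
    have hw : pvRank w = 0 ∨ pvRank w = 1 ∨ pvRank w = 2 := by
      unfold pvRank; split_ifs <;> simp
    have hm : pvRank m = 0 ∨ pvRank m = 1 ∨ pvRank m = 2 := by
      unfold pvRank; split_ifs <;> simp
    rw [List.foldl_cons]
    rcases hw with hw | hw | hw <;> rcases hm with hm | hm | hm <;>
      simp [pvMinStep, hw, hm, ih]

lemma find?_rank0 (ws : List (List (String × Option String))) :
    ws.find? (fun w => pvRank w == 0) = ws.find? pvIsDef := by
  induction ws with
  | nil => rfl
  | cons w t ih =>
    have : ((pvRank w == 0) : Bool) = pvIsDef w := by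
      cases h : pvIsDef w <;> simp [rank0_iff, h]
    simp [List.find?_cons, this, ih]

lemma find?_rank1 (ws : List (List (String × Option String)))
    (hnd : ∀ w ∈ ws, pvIsDef w = false) :
    ws.find? (fun w => pvRank w == 1) = ws.find? pvIsAct := by
  induction ws with
  | nil => rfl
  | cons w t ih =>
    have hd := hnd w (by simp)
    have : ((pvRank w == 1) : Bool) = pvIsAct w := by
      cases h : pvIsAct w <;> simp [rank1_iff, hd, h]
    simp [List.find?_cons, this, ih (fun x hx => hnd x (by simp [hx]))]

lemma pvIsAct_ne_nil {w : List (String × Option String)} (h : pvIsAct w = true) : w ≠ [] := by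
  intro hw; subst hw; simp [pvIsAct, pvDGet] at h

lemma pick_eq (ws : List (List (String × Option String))) (name : Option String) :
    pick_workspace_py ws name = pick_workspace_py_alt ws name := by
  unfold pick_workspace_py pick_workspace_py_alt
  by_cases hws : ws = []
  · simp [hws]
  · rw [if_neg hws, if_neg hws]
    cases name with
    | some n => rfl
    | none =>
      obtain ⟨w, t, rfl⟩ := List.exists_cons_of_ne_nil hws
      rw [min?_eq_foldl, List.foldl_cons]
      show _ = (List.foldl pvMinStep (pvMinStep none w) t).getD []
      rw [show pvMinStep none w = some w from rfl, foldl_step_some, find?_rank0]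
      by_cases hdw : pvIsDef w = true
      · have h0 : pvRank w = 0 := (rank0_iff w).mpr hdw
        simp [hdw, h0]
      · have hdw' : pvIsDef w = false := by simpa using hdw
        have h0 : pvRank w ≠ 0 := by simp [rank0_iff, hdw']
        rw [if_neg h0]
        simp only [List.find?_cons, hdw']
        cases hd : t.find? pvIsDef with
        | some d => simp
        | none =>
          have hnd : ∀ x ∈ t, pvIsDef x = false := by
            intro x hx
            have := List.find?_eq_none.mp hd x hx
            simpa using this
          rw [find?_rank1 t hnd]
          by_cases haw : pvIsAct w = true
          · have h1 : pvRank w = 1 := (rank1_iff w).mpr ⟨hdw', haw⟩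
            simp [haw, h1, pvIsAct_ne_nil haw]
          · have haw' : pvIsAct w = false := by simpa using haw
            have h1 : pvRank w ≠ 1 := by simp [rank1_iff, hdw', haw']
            rw [if_neg h1]
            simp only [haw']
            cases ha : t.find? pvIsAct with
            | some a =>
              have han : a ≠ [] := pvIsAct_ne_nil (List.find?_some ha)
              simp [han]
            | none => simp

-- ===== VERDICT =====
theorem pick_workspace_py_spec : Claim_equal_pick_workspace_py := by
  intro ws name _ _
  unfold Spec_pick_workspace_py
  exact pick_eq ws name
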